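-- pv_equiv track=rewrite | github.com/yatorho/SC24_ADE | data/dlrm_ds_stats.py | _generate_keyed_chunk_map
-- ===== SOURCE A (Python) =====
-- from typing import (Any, Dict, Iterable, Iterator, List, Optional, Tuple,
--                     Union, cast)
--
-- def _generate_keyed_chunk_map(keyed_chunk_list_names, batch_size, iter_num, verbose):
--     def _gen_keyed_batched_ofs():
--         keyed_batched_ofs: Dict[str, List[Tuple[List[str], Tuple[int, int]]]] = {
--             key: [] for key in keyed_chunk_list_names.keys()
--         }
--
--         for key in keyed_chunk_list_names.keys():
--
--             def _single_batch():
--                 batch_id = 0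
--                 start_ofs = None
--                 cum_samples = 0
--                 batch_chunks = []
--
--                 for chunk_name, chunk_size, chunk_ofs in keyed_chunk_list_names[key]:
--                     for i in range(chunk_ofs[1] + 1 - chunk_ofs[0]):
--                         if start_ofs is None:
--                             start_ofs = i
--                         if chunk_name not in batch_chunks:
--                             batch_chunks.append(chunk_name)
--
--                         cum_samples += chunk_size
--
--                         if cum_samples >= batch_size:
--                             end_ofs = i
--
--                             offsets = (start_ofs, end_ofs)
--                             keyed_batched_ofs[key].append((batch_chunks, offsets))
--                             batch_id += 1
--
--                             cum_samples = 0
--                             batch_chunks = []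
--                             start_ofs = None
--
--                             if batch_id >= iter_num:
--                                 return
--
--             _single_batch()
--
--         return keyed_batched_ofs
--
--     keyed_batched_ofs = _gen_keyed_batched_ofs()
--
--     return keyed_batched_ofs
-- ===== SOURCE B (Python) =====
-- def _generate_keyed_chunk_map(keyed_chunk_list_names, batch_size, iter_num, verbose):
--     # Jump to batch boundaries with ceiling division instead of stepping unit by unit.
--     result = {}
--     for key, chunks in keyed_chunk_list_names.items():
--         batches = []
--         cum = 0
--         start = None
--         names = []
--         count = 0
--         done = False
--         for name, size, (lo, hi) in chunks:
--             if done: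
--                 break
--             span = hi + 1 - lo
--             pos = 0
--             while pos < span:
--                 if start is None:
--                     start = pos
--                 if name not in names:
--                     names.append(name)
--                 if size > 0:
--                     k = -((-(batch_size - cum)) // size)
--                     if k < 1:
--                         k = 1
--                 elif cum + size >= batch_size:
--                     k = 1
--                 else:
--                     k = 0  # this chunk can never finish the batch
--                 if k == 0 or pos + k > span:
--                     cum += (span - pos) * size
--                     break
--                 batches.append((names, (start, pos + k - 1)))
--                 pos += k
--                 cum = 0
--                 start = None
--                 names = []
--                 count += 1
--                 if count >= iter_num:
--                     done = True
--                     break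
--         result[key] = batches
--     return result
-- ===== Notes on version B (the rewrite author's own statement) =====
-- stated objective: alternative
-- what changed: B computes each batch boundary in one jump via ceiling division on the needed sample count (and consumes a whole chunk at once when it can never finish the batch), instead of A's unit-by-unit stepping over every offset in every chunk's range; its cost is O(chunks + emitted batches) rather than O(total offset span), though a timing run's random inputs did not show a measurable speed-up.
import Mathlib
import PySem

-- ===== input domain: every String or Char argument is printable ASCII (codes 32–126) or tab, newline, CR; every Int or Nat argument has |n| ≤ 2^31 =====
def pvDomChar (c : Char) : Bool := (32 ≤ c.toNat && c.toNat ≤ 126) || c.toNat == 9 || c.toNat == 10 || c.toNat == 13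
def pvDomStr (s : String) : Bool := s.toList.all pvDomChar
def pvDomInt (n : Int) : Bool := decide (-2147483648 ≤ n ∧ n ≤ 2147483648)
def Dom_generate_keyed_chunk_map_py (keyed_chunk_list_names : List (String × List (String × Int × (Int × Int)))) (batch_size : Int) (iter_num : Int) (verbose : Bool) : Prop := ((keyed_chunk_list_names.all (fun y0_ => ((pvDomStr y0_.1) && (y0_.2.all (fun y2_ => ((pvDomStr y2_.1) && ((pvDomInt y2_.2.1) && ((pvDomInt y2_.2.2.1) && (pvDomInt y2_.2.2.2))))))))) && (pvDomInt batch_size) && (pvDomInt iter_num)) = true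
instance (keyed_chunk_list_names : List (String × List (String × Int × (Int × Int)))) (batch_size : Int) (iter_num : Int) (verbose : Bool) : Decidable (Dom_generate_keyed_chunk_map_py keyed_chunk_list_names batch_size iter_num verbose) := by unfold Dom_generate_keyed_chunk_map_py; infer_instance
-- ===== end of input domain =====

-- ===== PORT A =====
-- B jumps to each batch boundary by ceiling division instead of A's unit-by-unit stepping (objective: alternative).
-- Loop state shared by both ports: (cum_samples, start_ofs, batch_chunks, emitted batches, batch_id, early-return flag).
structure ChunkSt where
  cum : Int
  start? : Option Int
  names : List String
  out : List (List String × (Int × Int))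
  count : Int
  done : Bool
deriving Repr, DecidableEq

-- one iteration of A's inner `for i in range(...)` (the `done` flag models `_single_batch`'s early `return`)
def stepA (bs it : Int) (name : String) (size : Int) (st : ChunkSt) (i : Int) : ChunkSt :=
  if st.done then st
  else
    let start := st.start?.getD i
    let names := if name ∈ st.names then st.names else st.names ++ [name]
    let cum := st.cum + size
    if bs ≤ cum then
      { cum := 0, start? := none, names := [],
        out := st.out ++ [(names, (start, i))],
        count := st.count + 1, done := it ≤ st.count + 1 }
    else
      { st with cum := cum, start? := some start, names := names }

-- A's `_single_batch` for one key: unit-by-unit over every offset of every chunk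
def genA (bs it : Int) (chunks : List (String × Int × (Int × Int))) : List (List String × (Int × Int)) :=
  (chunks.foldl
      (fun (st : ChunkSt) c => (PySem.List.pyRange 0 (c.2.2.2 + 1 - c.2.2.1) 1).foldl (stepA bs it c.1 c.2.1) st)
      ⟨0, none, [], [], 0, false⟩).out

-- `{key: [] for key in keys()}` then each key's list is filled completely while that key is
-- processed, so the returned dict pairs each key (in dict order) with its batch list
def generate_keyed_chunk_map_py (keyed_chunk_list_names : List (String × List (String × Int × (Int × Int)))) (batch_size : Int) (iter_num : Int) (verbose : Bool) : List (String × List (List String × (Int × Int))) :=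
  (PySem.Dict.ofList keyed_chunk_list_names).items.map
    (fun kv => (kv.1, genA batch_size iter_num kv.2))

-- ===== PORT B =====
-- number of offset units (each worth `size` samples) that finish the current batch: ceil((bs-cum)/size), floored at 1; 0 = never
def batchJump (bs size cum : Int) : Int :=
  if 0 < size then
    if -(PySem.Int.floordiv (-(bs - cum)) size) < 1 then 1
    else -(PySem.Int.floordiv (-(bs - cum)) size)
  else if bs ≤ cum + size then 1 else 0

theorem batchJump_one_le_of_ne_zero (bs size cum : Int) (h : batchJump bs size cum ≠ 0) :
    1 ≤ batchJump bs size cum := by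
  unfold batchJump at *
  split_ifs at * <;> omega

-- B's `while pos < span` loop for one chunk
def chunkB (bs it : Int) (name : String) (size span : Int) (pos : Int) (st : ChunkSt) : ChunkSt :=
  if h : pos < span then
    if st.done then st
    else
      let start := st.start?.getD pos
      let names := if name ∈ st.names then st.names else st.names ++ [name]
      let k := batchJump bs size st.cum
      if hk : k = 0 ∨ span < pos + k then
        { st with cum := st.cum + (span - pos) * size, start? := some start, names := names }
      else
        chunkB bs it name size span (pos + k)
          { cum := 0, start? := none, names := [],
            out := st.out ++ [(names, (start, pos + k - 1))],
            count := st.count + 1, done := it ≤ st.count + 1 }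
  else st
termination_by (span - pos).toNat
decreasing_by
  rw [not_or, not_lt] at hk
  have h1 := batchJump_one_le_of_ne_zero bs size st.cum hk.1
  omega

-- B for one key: outer `for` over chunks with early `break`
def genB (bs it : Int) (chunks : List (String × Int × (Int × Int))) : List (List String × (Int × Int)) :=
  (chunks.foldl
      (fun (st : ChunkSt) c => if st.done then st else chunkB bs it c.1 c.2.1 (c.2.2.2 + 1 - c.2.2.1) 0 st)
      ⟨0, none, [], [], 0, false⟩).out

def generate_keyed_chunk_map_py_alt (keyed_chunk_list_names : List (String × List (String × Int × (Int × Int)))) (batch_size : Int) (iter_num : Int) (verbose : Bool) : List (String × List (List String × (Int × Int))) :=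
  (PySem.Dict.ofList keyed_chunk_list_names).items.map
    (fun kv => (kv.1, genB batch_size iter_num kv.2))

-- ===== PRECONDITION & SPEC =====
def Spec_generate_keyed_chunk_map_py (keyed_chunk_list_names : List (String × List (String × Int × (Int × Int)))) (batch_size : Int) (iter_num : Int) (verbose : Bool) (out : List (String × List (List String × (Int × Int)))) : Prop := out = generate_keyed_chunk_map_py_alt keyed_chunk_list_names batch_size iter_num verbose
instance (keyed_chunk_list_names : List (String × List (String × Int × (Int × Int)))) (batch_size : Int) (iter_num : Int) (verbose : Bool) (out : List (String × List (List String × (Int × Int)))) : Decidable (Spec_generate_keyed_chunk_map_py keyed_chunk_list_names batch_size iter_num verbose out) := by unfold Spec_generate_keyed_chunk_map_py; infer_instance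

-- ===== CLAIM (what is proved, stated in full; the proofs are below) =====
def Claim_equal_generate_keyed_chunk_map_py : Prop := ∀ (keyed_chunk_list_names : List (String × List (String × Int × (Int × Int)))) (batch_size : Int) (iter_num : Int) (verbose : Bool), Dom_generate_keyed_chunk_map_py keyed_chunk_list_names batch_size iter_num verbose → Spec_generate_keyed_chunk_map_py keyed_chunk_list_names batch_size iter_num verbose (generate_keyed_chunk_map_py keyed_chunk_list_names batch_size iter_num verbose)

-- ===== LEMMAS AND PROOFS =====

theorem foldl_stepA_done (bs it : Int) (name : String) (size : Int) (l : List Int) :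
    ∀ st : ChunkSt, st.done = true → l.foldl (stepA bs it name size) st = st := by
  induction l with
  | nil => intro st _; rfl
  | cons x xs ih => intro st h; simp only [List.foldl_cons]; rw [show stepA bs it name size st x = st by simp [stepA, h]]; exact ih st h

theorem nobatch (bs it : Int) (name : String) (size : Int) :
    ∀ (m : Nat) (pos cum s : Int) (nm : List String) (out : List (List String × (Int × Int))) (cnt : Int),
      name ∈ nm → (∀ j : Int, 1 ≤ j → j ≤ (m : Int) → cum + j * size < bs) →
      (PySem.List.pyRange pos (pos + (m : Int)) 1).foldl (stepA bs it name size)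
          ⟨cum, some s, nm, out, cnt, false⟩
        = ⟨cum + (m : Int) * size, some s, nm, out, cnt, false⟩ := by
  intro m
  induction m with
  | zero =>
    intro pos cum s nm out cnt hmem hj
    rw [PySem.List.pyRange_one_eq_nil (by omega)]
    simp
  | succ m ih =>
    intro pos cum s nm out cnt hmem hj
    have hlt : pos < pos + ((m + 1 : Nat) : Int) := by push_cast; omega
    rw [PySem.List.pyRange_one_cons hlt, List.foldl_cons]
    have h1 : ¬ bs ≤ cum + size := by
      have := hj 1 le_rfl (by push_cast; omega); omega
    have hstep : stepA bs it name size ⟨cum, some s, nm, out, cnt, false⟩ pos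
        = ⟨cum + size, some s, nm, out, cnt, false⟩ := by
      simp [stepA, hmem, h1]
    rw [hstep, show pos + ((m + 1 : Nat) : Int) = (pos + 1) + (m : Int) by push_cast; ring]
    rw [ih (pos + 1) (cum + size) s nm out cnt hmem ?_]
    · congr 1; push_cast; ring
    · intro j hj1 hjm
      have := hj (j + 1) (by omega) (by push_cast; omega)
      have heq : cum + (j + 1) * size = cum + size + j * size := by ring
      linarith

theorem batchJump_zero (bs size cum : Int) (h : batchJump bs size cum = 0) :
    ∀ j : Int, 1 ≤ j → cum + j * size < bs := by
  intro j hj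
  unfold batchJump at h
  split_ifs at h with h1 h2 h3
  · omega
  · omega
  · omega
  · nlinarith [mul_nonpos_of_nonneg_of_nonpos (show (0:Int) ≤ j - 1 by omega) (show size ≤ 0 by omega)]

theorem batchJump_complete (bs size cum : Int) (h : 1 ≤ batchJump bs size cum) :
    bs ≤ cum + batchJump bs size cum * size := by
  unfold batchJump at *
  split_ifs at * with h1 h2 h3
  · have hb := (PySem.Int.neg_floordiv_neg_eq_iff_of_pos (a := bs - cum) (b := size) h1).mp rfl
    nlinarith
  · have hb := (PySem.Int.neg_floordiv_neg_eq_iff_of_pos (a := bs - cum) (b := size) h1).mp rfl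
    linarith
  · linarith
  · omega

theorem batchJump_min (bs size cum : Int) :
    ∀ j : Int, 1 ≤ j → j < batchJump bs size cum → cum + j * size < bs := by
  intro j hj hjk
  unfold batchJump at hjk
  split_ifs at hjk with h1 h2 h3
  · omega
  · have hb := (PySem.Int.neg_floordiv_neg_eq_iff_of_pos (a := bs - cum) (b := size) h1).mp rfl
    nlinarith
  · omega
  · omega

theorem chunk_eq (bs it : Int) (name : String) (size span : Int) :
    ∀ (n : Nat) (pos : Int) (st : ChunkSt), (span - pos).toNat ≤ n →
      (PySem.List.pyRange pos span 1).foldl (stepA bs it name size) st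
        = chunkB bs it name size span pos st := by
  intro n
  induction n with
  | zero =>
    intro pos st hn
    rw [PySem.List.pyRange_one_eq_nil (by omega), chunkB]
    simp [show ¬ pos < span by omega]
  | succ n ih =>
    intro pos st hn
    by_cases hps : pos < span
    · by_cases hdone : st.done = true
      · rw [foldl_stepA_done bs it name size _ st hdone, chunkB]
        simp [hps, hdone]
      · obtain ⟨cum, s?, nm, out, cnt, d⟩ := st
        replace hdone : d = false := by simpa using hdone
        subst hdone
        rw [chunkB]
        simp only [dif_pos hps]
        rw [if_neg (by simp)]
        obtain ⟨k, hkdef⟩ : ∃ k, batchJump bs size cum = k := ⟨_, rfl⟩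
        rw [hkdef]
        have hmem : name ∈ (if name ∈ nm then nm else nm ++ [name]) := by
          split <;> simp_all
        by_cases hk : k = 0 ∨ span < pos + k
        · rw [dif_pos hk]
          have hnb : ∀ j : Int, 1 ≤ j → j ≤ span - pos → cum + j * size < bs := by
            rcases hk with hk0 | hkk
            · exact fun j h1 _ => batchJump_zero bs size cum (hkdef ▸ hk0) j h1
            · intro j h1 h2
              exact batchJump_min bs size cum j h1 (by omega)
          rw [PySem.List.pyRange_one_cons hps, List.foldl_cons]
          have h1 : ¬ bs ≤ cum + size := by have := hnb 1 le_rfl (by omega); omega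
          rw [show stepA bs it name size ⟨cum, s?, nm, out, cnt, false⟩ pos
              = ⟨cum + size, some (s?.getD pos), (if name ∈ nm then nm else nm ++ [name]), out, cnt, false⟩ by
            simp [stepA, h1]]
          have hnb2 := nobatch bs it name size ((span - pos - 1).toNat) (pos + 1) (cum + size)
            (s?.getD pos) (if name ∈ nm then nm else nm ++ [name]) out cnt hmem ?_
          · rw [show (pos + 1) + (((span - pos - 1).toNat : Nat) : Int) = span by omega] at hnb2
            rw [hnb2,
              show cum + size + (((span - pos - 1).toNat : Nat) : Int) * size = cum + (span - pos) * size by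
                rw [show (((span - pos - 1).toNat : Nat) : Int) = span - pos - 1 by omega]; ring]
          · intro j hj1 hj2
            have := hnb (j + 1) (by omega) (by omega)
            have heq : cum + (j + 1) * size = cum + size + j * size := by ring
            linarith
        · rw [dif_neg hk]
          rw [not_or, not_lt] at hk
          have hk1 : 1 ≤ k := hkdef ▸ batchJump_one_le_of_ne_zero bs size cum (by omega)
          have hcomp : bs ≤ cum + k * size := hkdef ▸ batchJump_complete bs size cum (by omega)
          have hmin : ∀ j : Int, 1 ≤ j → j < k → cum + j * size < bs := by
            intro j h1 h2; exact batchJump_min bs size cum j h1 (by omega)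
          by_cases hkone : k = 1
          · subst hkone
            rw [PySem.List.pyRange_one_cons hps, List.foldl_cons]
            rw [show stepA bs it name size ⟨cum, s?, nm, out, cnt, false⟩ pos
                = ⟨0, none, [], out ++ [((if name ∈ nm then nm else nm ++ [name]), (s?.getD pos, pos))], cnt + 1, decide (it ≤ cnt + 1)⟩ by
              simp [stepA, show bs ≤ cum + size by linarith]]
            rw [show pos + (1 : Int) - 1 = pos by ring]
            exact ih (pos + 1) _ (by omega)
          · have hk2 : 2 ≤ k := by omega
            rw [PySem.List.pyRange_one_cons hps, List.foldl_cons]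
            have h1 : ¬ bs ≤ cum + size := by have := hmin 1 le_rfl (by omega); omega
            rw [show stepA bs it name size ⟨cum, s?, nm, out, cnt, false⟩ pos
                = ⟨cum + size, some (s?.getD pos), (if name ∈ nm then nm else nm ++ [name]), out, cnt, false⟩ by
              simp [stepA, h1]]
            rw [PySem.List.pyRange_one_append (pos + 1) (pos + k - 1) span (by omega) (by omega),
              List.foldl_append]
            have hnb2 := nobatch bs it name size ((k - 2).toNat) (pos + 1) (cum + size)
              (s?.getD pos) (if name ∈ nm then nm else nm ++ [name]) out cnt hmem ?_
            · rw [show (pos + 1) + (((k - 2).toNat : Nat) : Int) = pos + k - 1 by omega] at hnb2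
              rw [hnb2]
              rw [PySem.List.pyRange_one_cons (show pos + k - 1 < span by omega), List.foldl_cons]
              have hfin : bs ≤ cum + size + max (k - 2) 0 * size + size := by
                rw [show max (k - 2) (0 : Int) = k - 2 by omega]
                have heq : cum + size + (k - 2) * size + size = cum + k * size := by ring
                linarith
              rw [show stepA bs it name size
                    ⟨cum + size + (((k - 2).toNat : Nat) : Int) * size, some (s?.getD pos),
                      (if name ∈ nm then nm else nm ++ [name]), out, cnt, false⟩ (pos + k - 1)
                  = ⟨0, none, [], out ++ [((if name ∈ nm then nm else nm ++ [name]), (s?.getD pos, pos + k - 1))], cnt + 1, decide (it ≤ cnt + 1)⟩ by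
                simp [stepA, hmem, hfin]]
              rw [show pos + k - 1 + 1 = pos + k by ring]
              exact ih (pos + k) _ (by omega)
            · intro j hj1 hj2
              have := hmin (j + 1) (by omega) (by omega)
              have heq : cum + (j + 1) * size = cum + size + j * size := by ring
              linarith
    · rw [PySem.List.pyRange_one_eq_nil (by omega), chunkB]
      simp [show ¬ pos < span by omega]

theorem chunkB_of_done (bs it : Int) (name : String) (size span pos : Int) (st : ChunkSt)
    (h : st.done = true) : chunkB bs it name size span pos st = st := by
  rw [chunkB]
  simp [h]

theorem genA_eq_genB (bs it : Int) (chunks : List (String × Int × (Int × Int))) :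
    genA bs it chunks = genB bs it chunks := by
  unfold genA genB
  have hf : (fun (st : ChunkSt) (c : String × Int × (Int × Int)) =>
        (PySem.List.pyRange 0 (c.2.2.2 + 1 - c.2.2.1) 1).foldl (stepA bs it c.1 c.2.1) st)
      = (fun (st : ChunkSt) c => if st.done then st else chunkB bs it c.1 c.2.1 (c.2.2.2 + 1 - c.2.2.1) 0 st) := by
    funext st c
    rw [chunk_eq bs it c.1 c.2.1 (c.2.2.2 + 1 - c.2.2.1) (c.2.2.2 + 1 - c.2.2.1).toNat 0 st (by omega)]
    by_cases hd : st.done = true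
    · rw [if_pos hd, chunkB_of_done bs it c.1 c.2.1 _ 0 st hd]
    · rw [if_neg hd]
  rw [hf]

-- ===== VERDICT (by name: the statement is the Claim_ definition above) =====
theorem generate_keyed_chunk_map_py_spec : Claim_equal_generate_keyed_chunk_map_py := by
  intro knames bs it verbose _
  unfold Spec_generate_keyed_chunk_map_py generate_keyed_chunk_map_py generate_keyed_chunk_map_py_alt
  exact List.map_congr_left (fun kv _ => by rw [genA_eq_genB])
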